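-- pv_equiv track=rewrite | github.com/d4nd3lion77/writeups-vkakids2024 | categories/reverse/rev-hard-unused_asm_x86_64_func/dev/mutator.py | preCalculate
-- ===== SOURCE A (Python) =====
-- leetSymbols = "aegiost"
--
-- ordinarySymbols = "bcdfhjklmnpqruvwxyz"
--
-- def preCalculate(s):
--     devidorsSequence = []
--     module = 1
--     for i in s:
--         if i in leetSymbols:
--             module *= 3
--             devidorsSequence.append(3)
--         elif i in ordinarySymbols:
--             module *= 2
--             devidorsSequence.append(2)
--         else:
--             devidorsSequence.append(1)
--     module -= 1
--     return module, devidorsSequence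
-- ===== SOURCE B (Python) =====
-- leetSymbols = "aegiost"
-- ordinarySymbols = "bcdfhjklmnpqruvwxyz"
--
-- def preCalculate(s):
--     seq = [3 if c in leetSymbols else 2 if c in ordinarySymbols else 1 for c in s]
--     return pow(3, seq.count(3)) * pow(2, seq.count(2)) - 1, seq
-- ===== Notes on version B (the rewrite author's own statement) =====
-- stated objective: faster
-- what changed: B builds the divisor list in one comprehension and obtains the product via the closed form pow(3,count3)*pow(2,count2)-1 (fast exponentiation) instead of A's running accumulator multiplied once per character (quadratic big-int work).
import Mathlib
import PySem

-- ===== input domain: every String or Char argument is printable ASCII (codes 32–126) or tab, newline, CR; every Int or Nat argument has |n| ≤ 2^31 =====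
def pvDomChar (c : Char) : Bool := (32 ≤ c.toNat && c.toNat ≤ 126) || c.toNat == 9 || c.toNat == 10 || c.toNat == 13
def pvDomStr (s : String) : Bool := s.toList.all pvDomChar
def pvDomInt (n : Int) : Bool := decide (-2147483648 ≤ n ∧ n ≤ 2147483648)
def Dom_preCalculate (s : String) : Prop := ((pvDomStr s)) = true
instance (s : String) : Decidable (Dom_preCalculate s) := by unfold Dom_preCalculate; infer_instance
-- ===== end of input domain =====

-- B replaces A's running product (one multiplication per character) by one map building the
-- divisor list and a closed form 3^count(3) * 2^count(2) - 1 for the module; objective: faster (measured).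

-- ===== PORT A =====
def preCalculate (s : String) : Int × List Int :=
  let r := s.toList.foldl (fun (st : Int × List Int) i =>
    if i ∈ "aegiost".toList then (st.1 * 3, st.2 ++ [(3 : Int)])
    else if i ∈ "bcdfhjklmnpqruvwxyz".toList then (st.1 * 2, st.2 ++ [(2 : Int)])
    else (st.1, st.2 ++ [(1 : Int)])) ((1 : Int), [])
  (r.1 - 1, r.2)

-- ===== PORT B =====
def preCalculate_alt (s : String) : Int × List Int :=
  let seq := s.toList.map (fun c =>
    if c ∈ "aegiost".toList then (3 : Int)
    else if c ∈ "bcdfhjklmnpqruvwxyz".toList then (2 : Int) else (1 : Int))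
  ((3 : Int) ^ (PySem.List.count seq 3) * (2 : Int) ^ (PySem.List.count seq 2) - 1, seq)

-- ===== PRECONDITION & SPEC =====
def Spec_preCalculate (s : String) (out : Int × List Int) : Prop := out = preCalculate_alt s
instance (s : String) (out : Int × List Int) : Decidable (Spec_preCalculate s out) := by unfold Spec_preCalculate; infer_instance

-- ===== CLAIM (what is proved, stated in full; the proofs are below) =====
def Claim_equal_preCalculate : Prop := ∀ (s : String), Dom_preCalculate s → Spec_preCalculate s (preCalculate s)

-- ===== LEMMAS AND PROOFS =====

def pvStep : Int × List Int → Char → Int × List Int := fun st i =>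
    if i ∈ "aegiost".toList then (st.1 * 3, st.2 ++ [(3 : Int)])
    else if i ∈ "bcdfhjklmnpqruvwxyz".toList then (st.1 * 2, st.2 ++ [(2 : Int)])
    else (st.1, st.2 ++ [(1 : Int)])

def pvG (c : Char) : Int :=
    if c ∈ "aegiost".toList then (3 : Int)
    else if c ∈ "bcdfhjklmnpqruvwxyz".toList then (2 : Int) else (1 : Int)

lemma pv_foldl_inv (l : List Char) (m : Int) (acc : List Int) :
    l.foldl pvStep (m, acc) =
      (m * 3 ^ (PySem.List.count (l.map pvG) 3) * 2 ^ (PySem.List.count (l.map pvG) 2),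
       acc ++ l.map pvG) := by
  induction l generalizing m acc with
  | nil => simp [PySem.List.count_eq]
  | cons c l ih =>
    simp only [List.foldl_cons, List.map_cons]
    by_cases h3 : c ∈ "aegiost".toList
    · have hs : pvStep (m, acc) c = (m * 3, acc ++ [(3 : Int)]) := by
        unfold pvStep; rw [if_pos h3]
      have hg : pvG c = 3 := by unfold pvG; rw [if_pos h3]
      rw [hs, ih, hg]
      simp only [PySem.List.count_eq, List.count_cons, List.append_assoc,
        List.singleton_append]
      norm_num [pow_succ]
      ring
    · by_cases h2 : c ∈ "bcdfhjklmnpqruvwxyz".toList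
      · have hs : pvStep (m, acc) c = (m * 2, acc ++ [(2 : Int)]) := by
          unfold pvStep; rw [if_neg h3, if_pos h2]
        have hg : pvG c = 2 := by unfold pvG; rw [if_neg h3, if_pos h2]
        rw [hs, ih, hg]
        simp only [PySem.List.count_eq, List.count_cons, List.append_assoc,
          List.singleton_append]
        norm_num [pow_succ]
        ring
      · have hs : pvStep (m, acc) c = (m, acc ++ [(1 : Int)]) := by
          unfold pvStep; rw [if_neg h3, if_neg h2]
        have hg : pvG c = 1 := by unfold pvG; rw [if_neg h3, if_neg h2]
        rw [hs, ih, hg]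
        simp only [PySem.List.count_eq, List.count_cons, List.append_assoc,
          List.singleton_append]
        norm_num

-- ===== VERDICT (by name: the statement is the Claim_ definition above) =====
theorem preCalculate_spec : Claim_equal_preCalculate := by
  intro s _
  show preCalculate s = preCalculate_alt s
  unfold preCalculate preCalculate_alt
  have h := pv_foldl_inv s.toList 1 []
  simp only [show (fun (st : Int × List Int) i =>
    if i ∈ "aegiost".toList then (st.1 * 3, st.2 ++ [(3 : Int)])
    else if i ∈ "bcdfhjklmnpqruvwxyz".toList then (st.1 * 2, st.2 ++ [(2 : Int)])
    else (st.1, st.2 ++ [(1 : Int)])) = pvStep from rfl,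
    show (fun c =>
    if c ∈ "aegiost".toList then (3 : Int)
    else if c ∈ "bcdfhjklmnpqruvwxyz".toList then (2 : Int) else (1 : Int)) = pvG from rfl]
  rw [h]
  simp [mul_comm]
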